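-- pv_equiv track=rewrite | github.com/Neilqdddd/dsc-401 | hw4.py | exclamation
-- ===== SOURCE A (Python) =====
-- def exclamation(word):
--     out=''
--     for alph in word:
--         if alph in 'aeiouAEIOU':
--             out +=4*alph
--         else:
--             out+=alph
--     return out+'!'
-- ===== SOURCE B (Python) =====
-- def exclamation(word):
--     for v in 'aeiouAEIOU':
--         word = word.replace(v, v * 4)
--     return word + '!'
-- ===== Notes on version B (the rewrite author's own statement) =====
-- stated objective: faster
-- what changed: Replaced A's single per-character Python loop with an if/else branch by ten staged whole-string str.replace passes, one per vowel; correctness rests on vowels being distinct and each replacement text containing only its own vowel, so later passes never touch earlier expansions.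
import Mathlib
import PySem

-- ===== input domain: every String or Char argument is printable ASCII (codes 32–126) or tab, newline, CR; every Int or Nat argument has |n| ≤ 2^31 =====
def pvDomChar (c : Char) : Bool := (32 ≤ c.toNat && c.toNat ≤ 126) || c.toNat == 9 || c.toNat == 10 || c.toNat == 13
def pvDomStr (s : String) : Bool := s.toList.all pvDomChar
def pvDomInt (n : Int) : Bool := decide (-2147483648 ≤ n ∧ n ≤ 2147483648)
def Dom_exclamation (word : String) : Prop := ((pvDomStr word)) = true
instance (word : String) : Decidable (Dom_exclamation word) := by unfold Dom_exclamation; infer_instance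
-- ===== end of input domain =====

-- B replaces A's single per-character loop (accumulator + if/else) by ten staged
-- whole-string str.replace passes, one per vowel (alternative decomposition).

-- ===== PORT A =====
-- out=''; for alph in word: out += 4*alph if alph in 'aeiouAEIOU' else alph; return out+'!'
def exclamation (word : String) : String :=
  String.mk
    ((word.toList.foldl
        (fun out alph =>
          if PySem.Chars.isIn [alph] "aeiouAEIOU".toList then
            out ++ (List.replicate 4 [alph]).flatten   -- 4*alph (repeat of the 1-char string)
          else
            out ++ [alph])
        []) ++ ['!'])

-- ===== PORT B =====
-- for v in 'aeiouAEIOU': word = word.replace(v, v*4); return word + '!'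
def exclamation_alt (word : String) : String :=
  String.mk
    (("aeiouAEIOU".toList.foldl
        (fun s v => PySem.Chars.replace s [v] (List.replicate 4 v))
        word.toList) ++ ['!'])

-- ===== PRECONDITION & SPEC =====
def Spec_exclamation (word : String) (out : String) : Prop := out = exclamation_alt word
instance (word : String) (out : String) : Decidable (Spec_exclamation word out) := by unfold Spec_exclamation; infer_instance

-- ===== CLAIM (what is proved, stated in full; the proofs are below) =====
def Claim_equal_exclamation : Prop := ∀ (word : String), Dom_exclamation word → Spec_exclamation word (exclamation word)

-- ===== LEMMAS AND PROOFS =====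

-- replace with a single-char pattern is a per-character flatMap
lemma pv_replace_go_single (v : Char) (new : List Char) :
    ∀ (l : List Char) (fuel : Nat) (acc : List Char), l.length ≤ fuel →
      PySem.Chars.replace.go [v] new fuel l acc
        = acc.reverse ++ l.flatMap (fun c => if c = v then new else [c]) := by
  intro l
  induction l with
  | nil =>
      intro fuel acc _
      cases fuel <;> simp [PySem.Chars.replace.go]
  | cons c t ih =>
      intro fuel acc hle
      cases fuel with
      | zero => simp at hle
      | succ fuel =>
          by_cases hc : c = v
          · have hp : List.isPrefixOf [v] (c :: t) = true := by
              simp [List.isPrefixOf, hc]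
            rw [PySem.Chars.replace.go, if_pos hp]
            simp only [List.length_cons] at hle
            simp only [List.length_cons, List.length_nil, List.drop_succ_cons, List.drop_zero]
            rw [ih fuel _ (by omega)]
            simp [hc]
          · have hp : ¬ (List.isPrefixOf [v] (c :: t) = true) := by
              simp [List.isPrefixOf]
              exact fun h => hc h.symm
            rw [PySem.Chars.replace.go, if_neg hp]
            simp only [List.length_cons] at hle
            rw [ih fuel _ (by omega)]
            simp [hc]

lemma pv_replace_single (v : Char) (new : List Char) (s : List Char) :
    PySem.Chars.replace s [v] new = s.flatMap (fun c => if c = v then new else [c]) := by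
  rw [PySem.Chars.replace]
  simp only [List.isEmpty_cons, Bool.false_eq_true, if_false]
  simpa using pv_replace_go_single v new s s.length [] le_rfl

-- staged replaces for a duplicate-free vowel list = one per-character flatMap
lemma pv_staged_eq (V : List Char) (hV : V.Nodup) : ∀ (s : List Char),
    V.foldl (fun s v => PySem.Chars.replace s [v] (List.replicate 4 v)) s
      = s.flatMap (fun c => if c ∈ V then List.replicate 4 c else [c]) := by
  induction V with
  | nil => intro s; simp
  | cons v V ih =>
      intro s
      obtain ⟨hvV, hVnd⟩ := List.nodup_cons.mp hV
      rw [List.foldl_cons, ih hVnd, pv_replace_single, List.flatMap_assoc]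
      apply List.flatMap_congr  -- pointwise equality of the per-char functions
      intro c _
      by_cases hc : c = v
      · subst hc
        simp only [List.mem_cons, true_or, if_pos]
        -- expanding c four times, then leaving each copy alone (c ∉ V)
        have : ∀ x ∈ List.replicate 4 c, (if x ∈ V then List.replicate 4 x else [x]) = [x] := by
          intro x hx
          rw [List.eq_of_mem_replicate hx]
          simp [hvV]
        calc (List.replicate 4 c).flatMap (fun x => if x ∈ V then List.replicate 4 x else [x])
            = (List.replicate 4 c).flatMap (fun x => [x]) := List.flatMap_congr this
          _ = List.replicate 4 c := by simp
      · simp [hc]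

-- A's accumulator loop is the same per-character flatMap
lemma pv_A_eq (l : List Char) : ∀ acc : List Char,
    l.foldl
      (fun out alph =>
        if PySem.Chars.isIn [alph] "aeiouAEIOU".toList then
          out ++ (List.replicate 4 [alph]).flatten
        else
          out ++ [alph]) acc
      = acc ++ l.flatMap (fun c => if c ∈ "aeiouAEIOU".toList then List.replicate 4 c else [c]) := by
  induction l with
  | nil => intro acc; simp
  | cons c t ih =>
      intro acc
      rw [List.foldl_cons, ih, List.flatMap_cons, ← List.append_assoc]
      congr 1
      by_cases hc : c ∈ "aeiouAEIOU".toList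
      · have hin : PySem.Chars.isIn [c] "aeiouAEIOU".toList = true :=
          (PySem.Chars.isIn_iff_infix _ _).mpr ((List.singleton_infix_iff c _).mpr hc)
        rw [if_pos hin, if_pos hc]
        rfl   -- (replicate 4 [c]).flatten = replicate 4 c
      · have hin : PySem.Chars.isIn [c] "aeiouAEIOU".toList = false :=
          (PySem.Chars.isIn_eq_false_iff _ _).mpr (fun h => hc ((List.singleton_infix_iff c _).mp h))
        rw [if_neg (by rw [hin]; exact Bool.false_ne_true), if_neg hc]

-- ===== VERDICT (by name: the statement is the Claim_ definition above) =====
theorem exclamation_spec : Claim_equal_exclamation := by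
  intro word _
  unfold Spec_exclamation exclamation exclamation_alt
  rw [pv_A_eq word.toList [], pv_staged_eq "aeiouAEIOU".toList (by decide) word.toList]
  simp
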